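-- pv_equiv track=rewrite | github.com/CemUmmak/Python-Binance-Grid-Bot | defs.py | find_round_value
-- ===== SOURCE A (Python) =====
-- def find_round_value(string_number):
--     count = -1
--
--     for i in string_number:
--         if i == ".":
--             count = 0
--         elif count >= 0:
--             count += 1
--
--     return count if count >= 0 else 0
-- ===== SOURCE B (Python) =====
-- def find_round_value(string_number):
--     idx = string_number.rfind('.')
--     return 0 if idx == -1 else len(string_number) - idx - 1
-- ===== Notes on version B (the rewrite author's own statement) =====
-- stated objective: simpler
-- what changed: Replaces the per-character counting state machine with a single rfind of the last decimal point plus length arithmetic (no explicit Python loop).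
import Mathlib
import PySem

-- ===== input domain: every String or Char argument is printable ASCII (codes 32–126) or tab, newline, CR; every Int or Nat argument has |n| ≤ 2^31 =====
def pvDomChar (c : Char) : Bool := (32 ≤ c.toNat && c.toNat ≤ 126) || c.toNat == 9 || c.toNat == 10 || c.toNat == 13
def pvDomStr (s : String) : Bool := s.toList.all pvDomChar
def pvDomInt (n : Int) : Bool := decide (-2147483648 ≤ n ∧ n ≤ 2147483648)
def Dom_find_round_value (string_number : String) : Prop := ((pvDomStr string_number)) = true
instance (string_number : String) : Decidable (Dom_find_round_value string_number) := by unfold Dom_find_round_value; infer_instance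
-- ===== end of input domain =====

-- B replaces A's per-character counting state machine with rfind('.') plus length arithmetic (simpler; same return values).


-- ===== PORT A =====
def find_round_value (string_number : String) : Int :=
  let count : Int := string_number.toList.foldl
    (fun count i => if i = '.' then 0 else if count ≥ 0 then count + 1 else count) (-1)
  if count ≥ 0 then count else 0

-- ===== PORT B =====
def find_round_value_alt (string_number : String) : Int :=
  let idx := PySem.Str.rfind string_number "."
  if idx = -1 then 0 else PySem.Str.len string_number - idx - 1

-- ===== PRECONDITION & SPEC =====
def Spec_find_round_value (string_number : String) (out : Int) : Prop := out = find_round_value_alt string_number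
instance (string_number : String) (out : Int) : Decidable (Spec_find_round_value string_number out) := by unfold Spec_find_round_value; infer_instance

-- ===== CLAIM (what is proved, stated in full; the proofs are below) =====
def Claim_equal_find_round_value : Prop := ∀ (string_number : String), Dom_find_round_value string_number → Spec_find_round_value string_number (find_round_value string_number)

-- ===== LEMMAS AND PROOFS =====

-- equation lemmas for rfind.go
theorem go_zero (s : List Char) :
    PySem.Chars.rfind.go s ['.'] 0 = if ['.'].isPrefixOf s then 0 else -1 := by
  simp [PySem.Chars.rfind.go]

theorem go_succ (s : List Char) (j : Nat) :
    PySem.Chars.rfind.go s ['.'] (j+1) =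
      if ['.'].isPrefixOf (s.drop (j+1)) then ((j : Int)+1) else PySem.Chars.rfind.go s ['.'] j := by
  simp [PySem.Chars.rfind.go]

-- single-char prefix check = head test
theorem prefix_dot (xs : List Char) : (['.'].isPrefixOf xs) = (xs.head? == some '.') := by
  cases xs with
  | nil => simp [List.isPrefixOf]
  | cons c cs => simp [List.isPrefixOf, eq_comm]

-- rfind.go on indices below s.length ignores an appended element
theorem go_append_lt (s : List Char) (c : Char) (n : Nat) (h : n < s.length) :
    PySem.Chars.rfind.go (s ++ [c]) ['.'] n = PySem.Chars.rfind.go s ['.'] n := by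
  induction n with
  | zero =>
      rw [go_zero, go_zero, prefix_dot, prefix_dot]
      cases s with
      | nil => simp at h
      | cons a as => simp
  | succ j ih =>
      rw [go_succ, go_succ]
      have hd : (s ++ [c]).drop (j+1) = s.drop (j+1) ++ [c] := by
        rw [List.drop_append_of_le_length (by omega)]
      have hne : s.drop (j+1) ≠ [] := by
        simp [List.drop_eq_nil_iff]; omega
      obtain ⟨a, as, hcons⟩ := List.exists_cons_of_ne_nil hne
      rw [hd, prefix_dot, prefix_dot, hcons]
      simp only [List.cons_append, List.head?_cons]
      rw [ih (by omega)]
      rfl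

-- how rfind on ['.'] evolves when one char is appended
theorem rfind_concat (s : List Char) (c : Char) :
    PySem.Chars.rfind (s ++ [c]) ['.'] =
      if c = '.' then (s.length : Int) else PySem.Chars.rfind s ['.'] := by
  unfold PySem.Chars.rfind
  have hlen : (s ++ [c]).length = s.length + 1 := by simp
  rw [hlen, go_succ]
  have h1 : (s ++ [c]).drop (s.length + 1) = [] := by
    apply List.drop_eq_nil_of_le; simp
  rw [h1]
  simp only [List.isPrefixOf, Bool.false_eq_true, if_false]
  cases hs : s.length with
  | zero =>
      have hnil : s = [] := List.length_eq_zero_iff.mp hs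
      subst hnil
      rw [go_zero, go_zero, prefix_dot, prefix_dot]
      by_cases hc : c = '.' <;> simp [hc]
  | succ j =>
      rw [← hs, show s.length = j + 1 from hs, go_succ]
      have hd : (s ++ [c]).drop (j+1) = [c] := by
        rw [show j + 1 = s.length from hs.symm, List.drop_append_of_le_length (le_refl _)]
        simp
      rw [hd, prefix_dot]
      by_cases hc : c = '.'
      · simp [hc]
      · simp only [List.head?_cons, beq_iff_eq, Option.some.injEq, hc, if_false]
        rw [go_append_lt s c j (by omega), go_succ]
        have hd2 : s.drop (j+1) = [] := by apply List.drop_eq_nil_of_le; omega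
        simp [hd2]

-- joint invariant: A's fold value in terms of rfind, plus the range of rfind
theorem joint (cs : List Char) :
    (cs.foldl (fun count i => if i = '.' then 0 else if count ≥ 0 then count + 1 else count) (-1 : Int)
      = if PySem.Chars.rfind cs ['.'] = -1 then -1
        else (cs.length : Int) - PySem.Chars.rfind cs ['.'] - 1)
    ∧ (PySem.Chars.rfind cs ['.'] = -1
       ∨ (0 ≤ PySem.Chars.rfind cs ['.'] ∧ PySem.Chars.rfind cs ['.'] < (cs.length : Int))) := by
  induction cs using List.reverseRecOn with
  | nil =>
      constructor
      · simp [PySem.Chars.rfind, go_zero, List.isPrefixOf]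
      · left; simp [PySem.Chars.rfind, go_zero, List.isPrefixOf]
  | append_singleton s c ih =>
      obtain ⟨ihf, ihr⟩ := ih
      rw [List.foldl_append, rfind_concat]
      have hlen : ((s ++ [c]).length : Int) = (s.length : Int) + 1 := by
        simp
      by_cases hc : c = '.'
      · subst hc
        have hne : ((s.length : Int)) ≠ -1 := by omega
        constructor
        · simp only [List.foldl_cons, List.foldl_nil, if_true]
          rw [if_neg hne, hlen]
          omega
        · right
          simp only [if_true]
          rw [hlen]
          constructor <;> omega
      · refine ⟨?_, ?_⟩
        · simp only [List.foldl_cons, List.foldl_nil, if_neg hc, ihf]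
          rcases ihr with h | ⟨h0, hl⟩
          · simp [h]
          · have hne : PySem.Chars.rfind s ['.'] ≠ -1 := by omega
            simp only [if_neg hne]
            have hpos : (fun count => if count ≥ (0:Int) then count + 1 else count)
                ((s.length : Int) - PySem.Chars.rfind s ['.'] - 1)
                = (s.length : Int) - PySem.Chars.rfind s ['.'] := by
              simp only [ge_iff_le]
              rw [if_pos (by omega)]; ring
            simp only [ge_iff_le] at hpos ⊢
            rw [hpos, hlen]; ring
        · rcases ihr with h | ⟨h0, hl⟩
          · left; simp [h, hc]
          · right; rw [if_neg hc, hlen]; omega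

-- ===== VERDICT (by name: the statement is the Claim_ definition above) =====
theorem find_round_value_spec : Claim_equal_find_round_value := by
  intro s _
  unfold Spec_find_round_value find_round_value find_round_value_alt
  simp only [PySem.Str.rfind_eq, PySem.Str.len]
  have hdot : (".").toList = ['.'] := by decide
  rw [hdot]
  obtain ⟨hf, hr⟩ := joint s.toList
  rw [hf]
  rcases hr with h | ⟨h0, hl⟩
  · simp [h]
  · have hne : PySem.Chars.rfind s.toList ['.'] ≠ -1 := by omega
    simp only [if_neg hne, ge_iff_le]
    rw [if_pos (by omega)]
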